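-- pv_equiv track=rewrite | github.com/ishaq-9e1/cyber-fraud-detector | module1/fraud_engine.py | sandwich_vowel
-- ===== SOURCE A (Python) =====
-- def sandwich_vowel(word):
--     """
--     Illustrative program: returns vowels surrounded by consonants
--     (kept for syllabus / demo compatibility)
--     """
--     vowels = "aeiou"
--     result = []
--
--     word = word.lower()
--
--     for i in range(1, len(word) - 1):
--         if (word[i] in vowels and
--             word[i - 1] not in vowels and
--             word[i + 1] not in vowels):
--             result.append(word[i])
--
--     return result
-- ===== SOURCE B (Python) =====
-- import re
--
-- def sandwich_vowel(word):
--     """Same result via a single regex: a vowel with non-vowel lookbehind/lookahead."""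
--     return re.findall(r'(?<=[^aeiou])[aeiou](?=[^aeiou])', word.lower())
-- ===== Notes on version B (the rewrite author's own statement) =====
-- stated objective: idiomatic
-- what changed: Replaced the explicit index loop over range(1, len-1) with a single re.findall using lookbehind/lookahead ([^aeiou]-flanked vowels), delegating the traversal to the regex engine's C-level left-to-right scan.
import Mathlib
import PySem

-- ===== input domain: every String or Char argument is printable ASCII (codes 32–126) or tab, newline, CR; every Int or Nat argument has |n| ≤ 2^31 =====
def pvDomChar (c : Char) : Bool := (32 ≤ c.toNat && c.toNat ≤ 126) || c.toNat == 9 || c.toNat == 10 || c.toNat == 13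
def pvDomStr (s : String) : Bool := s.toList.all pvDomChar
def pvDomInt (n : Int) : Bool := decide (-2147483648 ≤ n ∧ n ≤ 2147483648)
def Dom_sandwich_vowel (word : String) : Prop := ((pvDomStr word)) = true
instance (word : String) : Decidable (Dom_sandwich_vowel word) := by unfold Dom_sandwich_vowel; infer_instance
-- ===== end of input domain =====

-- B replaces A's index loop by re.findall(r'(?<=[^aeiou])[aeiou](?=[^aeiou])', word.lower()):
-- the regex engine's left-to-right scan with lookbehind/lookahead (idiomatic; same cost).

-- 'c in "aeiou"' for a single character: exact as char membership
def pvIsVowel (c : Char) : Bool := "aeiou".toList.contains c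

-- ===== PORT A =====
def sandwich_vowel (word : String) : List String :=
  let w := PySem.Str.lower word
  let l := w.toList
  (PySem.List.pyRange 1 ((l.length : Int) - 1) 1).foldl
    (fun result i =>
      if pvIsVowel (PySem.List.pyGetD l i ' ')
         && !pvIsVowel (PySem.List.pyGetD l (i - 1) ' ')
         && !pvIsVowel (PySem.List.pyGetD l (i + 1) ' ')
      then result ++ [String.mk [PySem.List.pyGetD l i ' ']]
      else result) []

-- ===== PORT B =====
-- Hand port of the regex scan (no PySem regex): re.findall walks the string left to
-- right carrying the last character (the lookbehind '(?<=[^aeiou])'), tries to match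
-- '[aeiou]' at the current position, and checks the lookahead '(?=[^aeiou])' on the
-- next character; positions without a preceding or following character cannot match.
-- This is exact for this pattern: every match has length 1, so the engine's
-- non-overlapping scan visits every position.
def pvReScan (prev : Char) : List Char → List String
  | c :: d :: rest =>
      (if pvIsVowel c && !pvIsVowel prev && !pvIsVowel d
       then [String.mk [c]] else [])
        ++ pvReScan c (d :: rest)
  | _ => []

def sandwich_vowel_alt (word : String) : List String :=
  match (PySem.Str.lower word).toList with
  | [] => []
  | a :: rest => pvReScan a rest

-- ===== PRECONDITION & SPEC =====
def Spec_sandwich_vowel (word : String) (out : List String) : Prop := out = sandwich_vowel_alt word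
instance (word : String) (out : List String) : Decidable (Spec_sandwich_vowel word out) := by unfold Spec_sandwich_vowel; infer_instance

-- ===== CLAIM (what is proved, stated in full; the proofs are below) =====
def Claim_equal_sandwich_vowel : Prop := ∀ (word : String), Dom_sandwich_vowel word → Spec_sandwich_vowel word (sandwich_vowel word)

-- ===== LEMMAS AND PROOFS =====

-- A's loop body as a predicate on the index (over a fixed char list)
def pvCond (l : List Char) (i : Int) : Bool :=
  pvIsVowel (PySem.List.pyGetD l i ' ')
    && !pvIsVowel (PySem.List.pyGetD l (i - 1) ' ')
    && !pvIsVowel (PySem.List.pyGetD l (i + 1) ' ')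

-- common recursion both sides reduce to
def pvWin : List Char → List String
  | a :: b :: c :: rest =>
      (if pvIsVowel b && !pvIsVowel a && !pvIsVowel c then [String.mk [b]] else [])
        ++ pvWin (b :: c :: rest)
  | _ => []

lemma reScan_eq_win (a : Char) (t : List Char) : pvReScan a t = pvWin (a :: t) := by
  induction t generalizing a with
  | nil => simp [pvReScan, pvWin]
  | cons b s ih =>
    match s with
    | [] => simp [pvReScan, pvWin]
    | c :: rest => simp only [pvReScan, pvWin, ih b]

def pvEmit (l : List Char) (i : Int) : String := String.mk [PySem.List.pyGetD l i ' ']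

lemma pvCond_nat (l : List Char) (k : Nat) :
    pvCond l ((k : Int) + 1)
      = (pvIsVowel (l.getD (k + 1) ' ') && !pvIsVowel (l.getD k ' ')
          && !pvIsVowel (l.getD (k + 2) ' ')) := by
  unfold pvCond
  rw [PySem.List.pyGetD_of_nonneg _ _ (by omega), PySem.List.pyGetD_of_nonneg _ _ (by omega),
    PySem.List.pyGetD_of_nonneg _ _ (by omega)]
  have h1 : ((k : Int) + 1).toNat = k + 1 := by omega
  have h2 : ((k : Int) + 1 - 1).toNat = k := by omega
  have h3 : ((k : Int) + 1 + 1).toNat = k + 2 := by omega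
  rw [h1, h2, h3]

lemma pvEmit_nat (l : List Char) (k : Nat) :
    pvEmit l ((k : Int) + 1) = String.mk [l.getD (k + 1) ' '] := by
  unfold pvEmit
  rw [PySem.List.pyGetD_of_nonneg _ _ (by omega)]
  have h1 : ((k : Int) + 1).toNat = k + 1 := by omega
  rw [h1]

lemma pvCond_shift (a : Char) (t : List Char) (k : Nat) :
    pvCond (a :: t) ((1 : Int) + (Nat.succ k : Nat)) = pvCond t ((1 : Int) + (k : Nat)) := by
  have e1 : (1 : Int) + (Nat.succ k : Nat) = ((k + 1 : Nat) : Int) + 1 := by push_cast; ring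
  have e2 : (1 : Int) + (k : Nat) = ((k : Nat) : Int) + 1 := by ring
  rw [e1, e2, pvCond_nat, pvCond_nat]
  simp

lemma pvEmit_shift (a : Char) (t : List Char) (k : Nat) :
    pvEmit (a :: t) ((1 : Int) + (Nat.succ k : Nat)) = pvEmit t ((1 : Int) + (k : Nat)) := by
  have e1 : (1 : Int) + (Nat.succ k : Nat) = ((k + 1 : Nat) : Int) + 1 := by push_cast; ring
  have e2 : (1 : Int) + (k : Nat) = ((k : Nat) : Int) + 1 := by ring
  rw [e1, e2, pvEmit_nat, pvEmit_nat]
  simp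

lemma range_filter_win (l : List Char) :
    (((List.range (l.length - 2)).map (fun k => ((1 : Int) + (k : Nat)))).filter (pvCond l)).map
      (pvEmit l) = pvWin l := by
  induction l with
  | nil => simp [pvWin]
  | cons a t ih =>
    match t with
    | [] => simp [pvWin]
    | [b] => simp [pvWin]
    | b :: c :: rest =>
      have hlen : (a :: b :: c :: rest).length - 2 = rest.length + 1 := by simp
      rw [hlen, List.range_succ_eq_map]
      have hc1 : pvCond (a :: b :: c :: rest) ((1 : Int) + ((0 : Nat) : Int))
          = (pvIsVowel b && !pvIsVowel a && !pvIsVowel c) := by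
        have : (1 : Int) + ((0 : Nat) : Int) = ((0 : Nat) : Int) + 1 := by push_cast
        rw [this, pvCond_nat]
        rfl
      have he1 : pvEmit (a :: b :: c :: rest) ((1 : Int) + ((0 : Nat) : Int))
          = String.mk [b] := by
        have : (1 : Int) + ((0 : Nat) : Int) = ((0 : Nat) : Int) + 1 := by push_cast
        rw [this, pvEmit_nat]
        rfl
      have htail :
          ((((List.range rest.length).map Nat.succ).map (fun k => ((1 : Int) + (k : Nat)))).filter
              (pvCond (a :: b :: c :: rest))).map (pvEmit (a :: b :: c :: rest))
          = pvWin (b :: c :: rest) := by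
        rw [List.map_map, List.filter_map, List.map_map]
        have hp : (pvCond (a :: b :: c :: rest) ∘ (fun k => ((1 : Int) + (k : Nat))) ∘ Nat.succ)
            = fun k : Nat => pvCond (b :: c :: rest) ((1 : Int) + (k : Nat)) := by
          funext k; exact pvCond_shift a (b :: c :: rest) k
        have he : (pvEmit (a :: b :: c :: rest) ∘ (fun k => ((1 : Int) + (k : Nat))) ∘ Nat.succ)
            = fun k : Nat => pvEmit (b :: c :: rest) ((1 : Int) + (k : Nat)) := by
          funext k; exact pvEmit_shift a (b :: c :: rest) k
        rw [hp, he]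
        have hm : (b :: c :: rest).length - 2 = rest.length := by simp
        rw [hm, List.filter_map, List.map_map] at ih
        simpa [Function.comp] using ih
      rw [List.map_cons, List.filter_cons, hc1]
      show _ = pvWin (a :: b :: c :: rest)
      rw [pvWin]
      cases hv : (pvIsVowel b && !pvIsVowel a && !pvIsVowel c) with
      | true => rw [if_pos rfl]; rw [List.map_cons, he1, htail]; rfl
      | false => rw [if_neg (by simp)]; rw [htail]; rfl

lemma aCore_eq_win (l : List Char) :
    (PySem.List.pyRange 1 ((l.length : Int) - 1) 1).foldl
      (fun result i =>
        if pvCond l i then result ++ [String.mk [PySem.List.pyGetD l i ' ']] else result) []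
      = pvWin l := by
  show (PySem.List.pyRange 1 ((l.length : Int) - 1) 1).foldl
      (fun result i => if pvCond l i then result ++ [pvEmit l i] else result) [] = pvWin l
  rw [PySem.List.foldl_append_if (pvCond l) (pvEmit l), PySem.List.pyRange_one]
  have h : (((l.length : Int) - 1) - 1).toNat = l.length - 2 := by omega
  rw [h, List.nil_append]
  exact range_filter_win l

lemma pvMain (l : List Char) :
    (PySem.List.pyRange 1 ((l.length : Int) - 1) 1).foldl
      (fun result i =>
        if pvCond l i then result ++ [String.mk [PySem.List.pyGetD l i ' ']] else result) []
      = (match l with | [] => [] | a :: rest => pvReScan a rest) := by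
  cases l with
  | nil => simp [PySem.List.pyRange]
  | cons a rest =>
    show _ = pvReScan a rest
    rw [reScan_eq_win]; exact aCore_eq_win _

-- ===== VERDICT (by name: the statement is the Claim_ definition above) =====
theorem sandwich_vowel_spec : Claim_equal_sandwich_vowel := by
  intro word _
  unfold Spec_sandwich_vowel sandwich_vowel sandwich_vowel_alt
  exact pvMain ((PySem.Str.lower word).toList)
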